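-- pv_equiv track=rewrite | github.com/matthematics/schubmult | src/schubmult/rings/polynomial_algebra/fundamental_slide_poly_basis.py | get_descent_composition
-- ===== SOURCE A (Python) =====
-- def get_descent_composition(word):
--     """Compute the descent composition of a word."""
--     if not word:
--         return []
--     descents = [1]
--     for i in range(len(word) - 1):
--         if word[i+1] > word[i]:
--             descents[-1] += 1
--         else:
--             descents.append(1)
--     return descents
-- ===== SOURCE B (Python) =====
-- def get_descent_composition(word):
--     """Compute the descent composition of a word."""
--     if not word:
--         return []
--     breaks = [i + 1 for i, (a, b) in enumerate(zip(word, word[1:])) if b <= a]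
--     bounds = [0] + breaks + [len(word)]
--     return [b2 - b1 for b1, b2 in zip(bounds, bounds[1:])]
-- ===== Notes on version B (the rewrite author's own statement) =====
-- stated objective: alternative
-- what changed: Instead of accumulating run lengths in place (incrementing/appending to the last entry while scanning), B first collects the list of descent (break) positions with one comprehension and then returns the consecutive differences of the boundary sequence 0, breaks, len(word) in a second pass.
import Mathlib
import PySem

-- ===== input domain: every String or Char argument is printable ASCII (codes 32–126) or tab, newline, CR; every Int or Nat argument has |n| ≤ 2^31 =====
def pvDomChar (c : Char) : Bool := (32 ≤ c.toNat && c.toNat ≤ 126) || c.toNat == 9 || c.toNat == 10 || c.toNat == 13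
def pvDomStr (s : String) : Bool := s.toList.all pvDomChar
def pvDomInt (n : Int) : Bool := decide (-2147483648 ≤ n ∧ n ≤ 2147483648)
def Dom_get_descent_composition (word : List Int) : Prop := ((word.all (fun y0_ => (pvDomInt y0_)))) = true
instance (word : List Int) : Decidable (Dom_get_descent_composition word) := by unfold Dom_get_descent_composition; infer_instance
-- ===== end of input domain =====

-- B replaces A's in-place run-length accumulator by a two-phase computation:
-- collect the descent positions, then take consecutive differences of the
-- boundaries 0, breaks…, len(word) (objective: alternative decomposition).

-- ===== PORT A =====
-- literal port of A: running list of run lengths, last entry incremented on ascent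
def get_descent_composition (word : List Int) : List Int :=
  if word = [] then []
  else
    (PySem.List.pyRange 0 ((word.length : Int) - 1) 1).foldl
      (fun descents i =>
        if PySem.List.pyGetD word (i + 1) 0 > PySem.List.pyGetD word i 0 then
          -- descents[-1] += 1  (indices always in range: descents is never empty)
          descents.dropLast ++ [PySem.List.pyGetD descents (-1) 0 + 1]
        else
          descents ++ [1])
      [1]

-- ===== PORT B =====
-- literal port of Source B: breaks via enumerate(zip(word, word[1:])), then diffs of bounds
def get_descent_composition_alt (word : List Int) : List Int :=
  if word = [] then []
  else
    let breaks :=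
      (PySem.List.enumerate (word.zip (PySem.List.slice word (some 1) none)) 0).filterMap
        (fun p => if p.2.2 ≤ p.2.1 then some (p.1 + 1) else none)
    let bounds := [0] ++ breaks ++ [(word.length : Int)]
    (bounds.zip (PySem.List.slice bounds (some 1) none)).map (fun q => q.2 - q.1)

-- ===== PRECONDITION & SPEC =====
def Spec_get_descent_composition (word : List Int) (out : List Int) : Prop := out = get_descent_composition_alt word
instance (word : List Int) (out : List Int) : Decidable (Spec_get_descent_composition word out) := by unfold Spec_get_descent_composition; infer_instance

-- ===== CLAIM (what is proved, stated in full; the proofs are below) =====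
def Claim_equal_get_descent_composition : Prop := ∀ (word : List Int), Dom_get_descent_composition word → Spec_get_descent_composition word (get_descent_composition word)

-- ===== LEMMAS AND PROOFS =====

-- A's loop body as a function of the adjacent pair
def pvStep (ds : List Int) (p : Int × Int) : List Int :=
  if p.2 > p.1 then ds.dropLast ++ [PySem.List.pyGetD ds (-1) 0 + 1] else ds ++ [1]

-- break positions of a pair list, starting at absolute position k
def pvBrk (k : Int) : List (Int × Int) → List Int
  | [] => []
  | p :: ps => if p.2 ≤ p.1 then (k + 1) :: pvBrk (k + 1) ps else pvBrk (k + 1) ps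

-- consecutive differences
def pvDiffs (bs : List Int) : List Int := (bs.zip bs.tail).map (fun q => q.2 - q.1)

theorem pvDiffs_cons_cons (x y : Int) (l : List Int) :
    pvDiffs (x :: y :: l) = (y - x) :: pvDiffs (y :: l) := by
  simp [pvDiffs]

theorem pvStep_append (ds : List Int) (v : Int) (p : Int × Int) :
    pvStep (ds ++ [v]) p =
      if p.2 > p.1 then ds ++ [v + 1] else (ds ++ [v]) ++ [1] := by
  unfold pvStep
  split_ifs with h
  · simp [PySem.List.pyGetD_neg_one_append_singleton]
  · rfl

-- main invariant: A's fold from state ds ++ [current run length] equals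
-- ds ++ differences of (s :: breaks ++ [end])
theorem pvMain (ps : List (Int × Int)) : ∀ (ds : List Int) (k s : Int),
    List.foldl pvStep (ds ++ [k + 1 - s]) ps
      = ds ++ pvDiffs (s :: pvBrk k ps ++ [k + 1 + (ps.length : Int)]) := by
  induction ps with
  | nil =>
      intro ds k s
      simp [pvBrk, pvDiffs]
  | cons p ps ih =>
      intro ds k s
      rw [List.foldl_cons, pvStep_append]
      by_cases h : p.2 > p.1
      · rw [if_pos h]
        have e : k + 1 - s + 1 = (k + 1) + 1 - s := by ring
        rw [e, ih ds (k + 1) s]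
        have h2 : ¬ p.2 ≤ p.1 := by omega
        have hbrk : pvBrk k (p :: ps) = pvBrk (k + 1) ps := by simp [pvBrk, h2]
        have hlen2 : (((p :: ps).length : Nat) : Int) = (ps.length : Int) + 1 := by
          push_cast [List.length_cons]; ring
        have hn : k + 1 + ((ps.length : Int) + 1) = k + 1 + 1 + (ps.length : Int) := by ring
        rw [hbrk, hlen2, hn]
      · rw [if_neg h]
        have h2 : p.2 ≤ p.1 := by omega
        have hone : (k + 1) + 1 - (k + 1) = (1 : Int) := by ring
        have hfold := ih (ds ++ [k + 1 - s]) (k + 1) (k + 1)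
        rw [hone] at hfold
        have hbrk : pvBrk k (p :: ps) = (k + 1) :: pvBrk (k + 1) ps := by simp [pvBrk, h2]
        have hlen2 : (((p :: ps).length : Nat) : Int) = (ps.length : Int) + 1 := by
          push_cast [List.length_cons]; ring
        have hn : k + 1 + ((ps.length : Int) + 1) = k + 1 + 1 + (ps.length : Int) := by ring
        rw [hfold, hbrk, hlen2, hn]
        simp only [List.cons_append]
        rw [pvDiffs_cons_cons]
        simp

-- bridge: A's index fold over range equals the fold over adjacent pairs
theorem pvRangeZip (w : List Int) (g : List Int → Int → Int → List Int) :
    ∀ (m : Nat), m ≤ (w.zip w.tail).length → ∀ (init : List Int),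
    (List.range m).foldl (fun ds j => g ds (w.getD j 0) (w.getD (j + 1) 0)) init
      = ((w.zip w.tail).take m).foldl (fun ds p => g ds p.1 p.2) init := by
  intro m
  induction m with
  | zero => intro _ init; simp
  | succ m ih =>
      intro hm init
      have hm' : m < (w.zip w.tail).length := by omega
      have hmt : m < w.tail.length := by
        rw [List.length_zip] at hm'; omega
      have hw : m + 1 < w.length := by
        rw [List.length_tail] at hmt; omega
      rw [List.range_succ, List.foldl_append, ih (by omega) init]
      have htake : (w.zip w.tail).take (m + 1)
          = (w.zip w.tail).take m ++ [(w.zip w.tail)[m]] := by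
        rw [List.take_add_one]
        simp [List.getElem?_eq_getElem hm']
      rw [htake, List.foldl_append]
      simp only [List.foldl_cons, List.foldl_nil]
      have h1 : w.getD m 0 = w[m] := List.getD_eq_getElem w 0 (by omega)
      have h2 : w.getD (m + 1) 0 = w[m + 1] := List.getD_eq_getElem w 0 hw
      have h3 : (w.zip w.tail)[m] = (w[m], w[m + 1]) := by
        simp [List.getElem_zip, List.getElem_tail]
      rw [h1, h2, h3]

-- B's break comprehension equals pvBrk
theorem pvBreaksEq (ps : List (Int × Int)) : ∀ (s : Int),
    (PySem.List.enumerate ps s).filterMap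
        (fun p => if p.2.2 ≤ p.2.1 then some (p.1 + 1) else none)
      = pvBrk s ps := by
  induction ps with
  | nil => intro s; simp [PySem.List.enumerate_nil, pvBrk]
  | cons p ps ih =>
      intro s
      rw [PySem.List.enumerate_cons]
      by_cases h : p.2 ≤ p.1
      · simp [h, pvBrk, ih (s + 1)]
      · simp [h, pvBrk, ih (s + 1)]

-- ===== VERDICT (by name: the statement is the Claim_ definition above) =====
theorem get_descent_composition_spec : Claim_equal_get_descent_composition := by
  intro word _
  unfold Spec_get_descent_composition get_descent_composition get_descent_composition_alt
  by_cases hw : word = []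
  · simp [hw]
  · rw [if_neg hw, if_neg hw]
    obtain ⟨a, ws, rfl⟩ := List.exists_cons_of_ne_nil hw
    have hzlen : ((a :: ws).zip (a :: ws).tail).length = ws.length := by
      simp [List.length_zip]
    -- A side: index fold = fold over adjacent pairs
    have hb := pvRangeZip (a :: ws) (fun ds x y => pvStep ds (x, y)) ws.length
      (by omega) [1]
    have htk : ((a :: ws).zip (a :: ws).tail).take ws.length
        = (a :: ws).zip (a :: ws).tail := by
      rw [← hzlen]; exact List.take_length
    rw [htk] at hb
    have h1 : (((a :: ws).length : Int) - 1) = ((ws.length : Nat) : Int) := by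
      simp
    rw [h1, PySem.List.pyRange_zero_nat, List.foldl_map]
    have hcong :
        (List.range ws.length).foldl
          (fun x (y : Nat) =>
            if PySem.List.pyGetD (a :: ws) (((y : Int)) + 1) 0 > PySem.List.pyGetD (a :: ws) ((y : Int)) 0 then
              x.dropLast ++ [PySem.List.pyGetD x (-1) 0 + 1]
            else x ++ [1]) [1]
        = (List.range ws.length).foldl
            (fun ds (j : Nat) => pvStep ds ((a :: ws).getD j 0, (a :: ws).getD (j + 1) 0)) [1] := by
      apply PySem.List.foldl_congr_mem
      intro acc k _
      have hcast : ((k : Int)) + 1 = (((k + 1 : Nat)) : Int) := by push_cast; ring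
      rw [hcast, PySem.List.pyGetD_natCast, PySem.List.pyGetD_natCast]
      simp [pvStep]
    rw [hcong, hb]
    -- now apply the main invariant with ds = [], k = 0, s = 0
    have hstart : ([ (1 : Int) ]) = ([] : List Int) ++ [(0 : Int) + 1 - 0] := by norm_num
    rw [hstart, pvMain]
    -- B side
    simp only [PySem.List.slice_from_one, pvBreaksEq, List.nil_append]
    have hnum : (0 : Int) + 1 + ((((a :: ws).zip (a :: ws).tail).length : Nat) : Int)
        = (((a :: ws).length : Nat) : Int) := by
      rw [hzlen]; push_cast [List.length_cons]; ring
    rw [hnum]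
    rfl
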